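-- pv_equiv track=rewrite | github.com/yangchoi/algorithm-again | book/picking_dolls2.py | solution
-- ===== SOURCE A (Python) =====
-- def solution(board, moves):
--     # 각 인형들을 넣을 lanes 들이 필요하다.
--     lanes = [[] for _ in range(len(board[0]))]
--
--     # 가로
--     for i in range(len(board) -1, -1, -1):
--         # 세로
--         for j in range(len(board[0])):
--             if board[i][j]:
--                 lanes[j].append(board[i][j])
--
--     dolls = [] # 인형을 넣을 곳
--     answer = 0
--     for m in moves:
--         if lanes[m - 1]:
--             doll = lanes[m - 1].pop()
--
--             if dolls and dolls[-1] == doll: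
--                 dolls.pop()
--                 answer += 2
--             else:
--                 dolls.append(doll)
--
--     return answer
-- ===== SOURCE B (Python) =====
-- def solution(board, moves):
--     height = len(board)
--     top = [0] * len(board[0])
--     dolls = []
--     answer = 0
--     for m in moves:
--         c = m - 1
--         r = top[c]
--         while r < height and board[r][c] == 0:
--             r += 1
--         if r < height:
--             top[c] = r + 1
--             doll = board[r][c]
--             if dolls and dolls[-1] == doll:
--                 dolls.pop()
--                 answer += 2
--             else:
--                 dolls.append(doll)
--     return answer
-- ===== Notes on version B (the rewrite author's own statement) =====
-- stated objective: alternative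
-- what changed: Replaces A's upfront pass that builds per-column lane stacks over the whole board with lazy per-column downward pointers that scan each column on demand during the moves loop; Pre_ excludes inputs where A raises IndexError and also non-positive move numbers, on which A's value arises only from accidental negative-index wraparound of its lane table (columns are numbered 1..width).
-- outside the precondition, e.g. on solution([[9, 9], [2, 5, 9]], [0, 0]): A returns 0, B returns 2
import Mathlib
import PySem

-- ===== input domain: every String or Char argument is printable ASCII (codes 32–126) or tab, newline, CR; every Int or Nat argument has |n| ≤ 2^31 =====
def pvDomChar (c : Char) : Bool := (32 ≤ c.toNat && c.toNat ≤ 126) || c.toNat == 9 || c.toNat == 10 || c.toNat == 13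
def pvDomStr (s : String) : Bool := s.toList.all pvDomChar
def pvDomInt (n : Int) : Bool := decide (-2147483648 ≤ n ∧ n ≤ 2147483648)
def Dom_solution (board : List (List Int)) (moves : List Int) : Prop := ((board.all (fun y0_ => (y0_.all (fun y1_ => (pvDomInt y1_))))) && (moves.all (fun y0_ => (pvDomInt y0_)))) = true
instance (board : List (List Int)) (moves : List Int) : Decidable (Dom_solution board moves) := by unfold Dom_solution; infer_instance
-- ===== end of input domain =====

-- B replaces A's upfront lane-table build with lazy per-column pointers; equal answer on the stated Pre_ (neither program mutates the board).

-- ===== PORT A =====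
-- loop body of A's moves loop; state = (lanes, dolls, answer)
def stepA (st : List (List Int) × List Int × Int) (m : Int) : List (List Int) × List Int × Int :=
  let lane := PySem.List.pyGetD st.1 (m - 1) []          -- lanes[m-1] (in range under Pre_)
  if lane ≠ [] then
    let doll := PySem.List.pyGetD lane (-1) 0            -- lanes[m-1].pop(): read the last element …
    let lanes' := PySem.List.pySetD st.1 (m - 1) lane.dropLast   -- … and remove it
    if st.2.1 ≠ [] ∧ PySem.List.pyGetD st.2.1 (-1) 0 = doll then
      (lanes', st.2.1.dropLast, st.2.2 + 2)
    else
      (lanes', st.2.1 ++ [doll], st.2.2)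
  else st

def solution (board : List (List Int)) (moves : List Int) : Int :=
  let width : Int := (board.headI.length : Int)          -- len(board[0]); board ≠ [] under Pre_
  let lanes :=
    (PySem.List.pyRange ((board.length : Int) - 1) (-1) (-1)).foldl (fun lanes i =>
      (PySem.List.pyRange 0 width 1).foldl (fun lanes j =>
        let v := PySem.List.pyGetD (PySem.List.pyGetD board i []) j 0   -- board[i][j] (in range under Pre_)
        if v ≠ 0 then PySem.List.pySetD lanes j (PySem.List.pyGetD lanes j [] ++ [v]) else lanes)
        lanes)
      (List.replicate board.headI.length ([] : List Int))
  (moves.foldl stepA (lanes, ([], 0))).2.2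

-- ===== PORT B =====
-- while r < height and board[r][c] == 0: r += 1   (r starts non-negative, so board[r] is a plain lookup)
def skipZeros (board : List (List Int)) (c : Int) (r : Nat) : Nat :=
  if h : r < board.length then
    if PySem.List.pyGetD (board.getD r []) c 0 = 0 then skipZeros board c (r + 1) else r
  else r
termination_by board.length - r

-- loop body of B's moves loop; state = (top, dolls, answer)
def stepB (board : List (List Int)) (st : List Nat × List Int × Int) (m : Int) : List Nat × List Int × Int :=
  let c := m - 1
  let r0 := PySem.List.pyGetD st.1 c 0                   -- top[c] (in range under Pre_)
  let r := skipZeros board c r0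
  if r < board.length then
    let top' := PySem.List.pySetD st.1 c (r + 1)         -- top[c] = r + 1
    let doll := PySem.List.pyGetD (board.getD r []) c 0  -- board[r][c]
    if st.2.1 ≠ [] ∧ PySem.List.pyGetD st.2.1 (-1) 0 = doll then
      (top', st.2.1.dropLast, st.2.2 + 2)
    else
      (top', st.2.1 ++ [doll], st.2.2)
  else st

def solution_alt (board : List (List Int)) (moves : List Int) : Int :=
  (moves.foldl (stepB board) (List.replicate board.headI.length 0, ([], 0))).2.2

-- ===== PRECONDITION & SPEC =====
-- Pre_ excludes (a) inputs on which A raises IndexError (empty board, a row shorter than the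
-- first row, a move with m-1 outside the lane list's index range), and (b) the combination of a
-- ragged board with a non-positive move, where A's value arises only from accidental
-- negative-index wraparound of its width-long lane table while the board rows wrap at their own
-- lengths — neither value is specified there (see the cite in the claim).
def Pre_solution (board : List (List Int)) (moves : List Int) : Prop :=
  board ≠ [] ∧ (∀ row ∈ board, board.headI.length ≤ row.length) ∧
  (∀ m ∈ moves, 1 - (board.headI.length : Int) ≤ m ∧ m ≤ (board.headI.length : Int)) ∧
  ((∃ m ∈ moves, m ≤ 0) → ∀ row ∈ board, row.length = board.headI.length)
instance (board : List (List Int)) (moves : List Int) : Decidable (Pre_solution board moves) := by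
  unfold Pre_solution; infer_instance

def pvWitness_solution : List (List Int) × List Int :=
  ([[0, 3], [1, 2]], [1, 2, 2, 1])

def Spec_solution (board : List (List Int)) (moves : List Int) (out : Int) : Prop := out = solution_alt board moves
instance (board : List (List Int)) (moves : List Int) (out : Int) : Decidable (Spec_solution board moves out) := by unfold Spec_solution; infer_instance

-- ===== CLAIM (what is proved, stated in full; the proofs are below) =====
def Claim_equal_solution : Prop := ∀ (board : List (List Int)) (moves : List Int), Dom_solution board moves → Pre_solution board moves → Spec_solution board moves (solution board moves)

-- ===== LEMMAS AND PROOFS =====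

-- column c of the board, as A effectively reads it (entries past a row's end never occur under Pre_)
def colOf (board : List (List Int)) (c : Nat) : List Int := board.map (fun row => row.getD c 0)

-- the simulation invariant: each lane equals the reversed nonzero remainder of its column below its pointer
def SimInv (board : List (List Int)) (W : Nat) (lanes : List (List Int)) (top : List Nat) : Prop :=
  lanes.length = W ∧ top.length = W ∧
  ∀ c < W, lanes.getD c [] =
    (((colOf board c).drop (top.getD c 0)).filter (fun x => x ≠ 0)).reverse

lemma getD_set {α : Type} (L : List α) (j c : Nat) (v d : α) (h : j < L.length) :
    (L.set j v).getD c d = if j = c then v else L.getD c d := by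
  simp [List.getD, List.getElem?_set, h]
  split <;> simp_all

-- Python's non-negative list lookup with a default
lemma pyGetD_nonneg {α : Type} (xs : List α) (i : Int) (d : α) (h : 0 ≤ i) :
    PySem.List.pyGetD xs i d = xs.getD i.toNat d := by
  conv_lhs => rw [← Int.toNat_of_nonneg h]
  rw [PySem.List.pyGetD_natCast]

lemma emod_shift (i W : Int) (h0 : 0 < W) (hlo : -W ≤ i) (hhi : i < 0) : i % W = i + W := by
  have h1 : (i + W) % W = i % W := by
    have := Int.add_mul_emod_self_left (a := i) (b := W) (c := 1)
    simpa using this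
  rw [← h1, Int.emod_eq_of_lt (by omega) (by omega)]

-- Python's negative-index lookup on a W-long list is lookup at (i % W)
lemma pyGetD_mod {α : Type} (xs : List α) (i W : Int) (d : α) (hW : (xs.length : Int) = W)
    (h0 : 0 < W) (hlo : -W ≤ i) (hhi : i < W) :
    PySem.List.pyGetD xs i d = xs.getD (PySem.Int.mod i W).toNat d := by
  rw [PySem.Int.mod_eq_emod_of_pos h0]
  by_cases hi : 0 ≤ i
  · rw [Int.emod_eq_of_lt hi hhi, PySem.List.pyGetD_eq_getElem xs d hi (by omega)]
    rw [List.getD_eq_getElem _ _ (by omega)]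
  · have hmod : i % W = i + W := emod_shift i W h0 hlo (by omega)
    have hk : i = -(((-i).toNat : Nat) : Int) := by omega
    rw [hmod, hk, PySem.List.pyGetD_neg_natCast xs _ d (by omega) (by omega)]
    rw [List.getD_eq_getElem _ _ (by omega)]
    congr 1
    omega

lemma pySetD_mod {α : Type} (xs : List α) (i W : Int) (v : α) (hW : (xs.length : Int) = W)
    (h0 : 0 < W) (hlo : -W ≤ i) (hhi : i < W) :
    PySem.List.pySetD xs i v = xs.set (PySem.Int.mod i W).toNat v := by
  rw [PySem.Int.mod_eq_emod_of_pos h0]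
  by_cases hi : 0 ≤ i
  · rw [Int.emod_eq_of_lt hi hhi, PySem.List.pySetD_of_nonneg xs v hi]
  · have hmod : i % W = i + W := emod_shift i W h0 hlo (by omega)
    rw [hmod]
    simp only [PySem.List.pySetD, PySem.List.pySet?, PySem.List.pyIdx?, if_neg hi,
      if_pos (show -(xs.length : Int) ≤ i by omega), Option.map_some, Option.getD_some]
    congr 1
    omega

lemma colOf_drop_cons (board : List (List Int)) (c : Nat) (r : Nat) (h : r < board.length) :
    (colOf board c).drop r = ((board.getD r []).getD c 0) :: (colOf board c).drop (r + 1) := by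
  have hlen : r < (colOf board c).length := by simpa [colOf] using h
  rw [List.drop_eq_getElem_cons hlen]
  simp [colOf, List.getD, List.getElem?_eq_getElem h]

lemma getD_mem_of_lt (board : List (List Int)) (r : Nat) (h : r < board.length) :
    board.getD r [] ∈ board := by
  rw [List.getD_eq_getElem board [] h]
  exact List.getElem_mem h

-- B's while loop lands right after the leading zeros of the column remainder
-- (hrow: on every row, B's Python-index read at i is the read of column c A effectively uses)
lemma skipZeros_spec (board : List (List Int)) (i : Int) (c : Nat)
    (hrow : ∀ row ∈ board, PySem.List.pyGetD row i 0 = row.getD c 0) :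
    ∀ r, skipZeros board i r =
      r + (((colOf board c).drop r).takeWhile (fun x => x = 0)).length := by
  intro r
  induction r using skipZeros.induct (board := board) (c := i) with
  | case1 r h h0 ih =>
    rw [hrow _ (getD_mem_of_lt board r h)] at h0
    rw [skipZeros, dif_pos h, if_pos (by rw [hrow _ (getD_mem_of_lt board r h)]; exact h0),
      ih, colOf_drop_cons board c r h, List.takeWhile_cons, if_pos (by simpa using h0)]
    simp; omega
  | case2 r h h0 =>
    rw [hrow _ (getD_mem_of_lt board r h)] at h0
    rw [skipZeros, dif_pos h, if_neg (by rw [hrow _ (getD_mem_of_lt board r h)]; exact h0),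
      colOf_drop_cons board c r h, List.takeWhile_cons, if_neg (by simpa using h0)]
    simp
  | case3 r h =>
    rw [skipZeros, dif_neg h]
    have : (colOf board c).drop r = [] := by
      apply List.drop_eq_nil_of_le; simp [colOf]; omega
    simp [this]

-- an all-zero suffix: the zero-prefix is everything
lemma col_allzero (s : List Int) (h : ∀ x ∈ s, x = 0) :
    s.takeWhile (fun x => x = 0) = s := by
  induction s with
  | nil => rfl
  | cons a t ih =>
    rw [List.takeWhile_cons, if_pos (by simp [h a (by simp)])]
    rw [ih (fun x hx => h x (by simp [hx]))]

-- a nonzero somewhere: what sits right after the zero-prefix, and how the filter decomposes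
lemma col_decomp (s : List Int) (h : s.filter (fun x => x ≠ 0) ≠ []) :
    ∃ e rest, s.drop (s.takeWhile (fun x => x = 0)).length = e :: rest ∧ e ≠ 0 ∧
      s.filter (fun x => x ≠ 0) = e :: rest.filter (fun x => x ≠ 0) := by
  induction s with
  | nil => simp at h
  | cons a t ih =>
    by_cases ha : a = 0
    · have h' : t.filter (fun x => x ≠ 0) ≠ [] := by
        simpa [List.filter_cons, ha] using h
      obtain ⟨e, rest, h1, h2, h3⟩ := ih h'
      refine ⟨e, rest, ?_, h2, ?_⟩
      · simpa [List.takeWhile_cons, ha] using h1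
      · simpa [List.filter_cons, ha] using h3
    · exact ⟨a, t, by simp [List.takeWhile_cons, ha], ha, by simp [List.filter_cons, ha]⟩

-- one row of A's build pass: appends the row's nonzero entries to the matching lanes
lemma inner_spec (board : List (List Int)) (W : Nat) (i : Int) :
    ∀ (n : Nat), n ≤ W → ∀ (L : List (List Int)), L.length = W →
      (((PySem.List.pyRange 0 (n : Int) 1).foldl (fun lanes j =>
          let v := PySem.List.pyGetD (PySem.List.pyGetD board i []) j 0
          if v ≠ 0 then PySem.List.pySetD lanes j (PySem.List.pyGetD lanes j [] ++ [v]) else lanes)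
          L).length = W ∧
       ∀ c < W, ((PySem.List.pyRange 0 (n : Int) 1).foldl (fun lanes j =>
          let v := PySem.List.pyGetD (PySem.List.pyGetD board i []) j 0
          if v ≠ 0 then PySem.List.pySetD lanes j (PySem.List.pyGetD lanes j [] ++ [v]) else lanes)
          L).getD c [] =
        if c < n then
          L.getD c [] ++ (if (PySem.List.pyGetD board i []).getD c 0 ≠ 0
                          then [(PySem.List.pyGetD board i []).getD c 0] else [])
        else L.getD c []) := by
  intro n
  induction n with
  | zero => intro _ L hL; simp [hL]
  | succ n ih =>
    intro hn L hL
    have hrange : PySem.List.pyRange 0 ((n : Int) + 1) 1 =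
        PySem.List.pyRange 0 (n : Int) 1 ++ [(n : Int)] := by
      exact PySem.List.pyRange_one_succ_right (by positivity)
    obtain ⟨ihlen, ihget⟩ := ih (by omega) L hL
    push_cast
    rw [hrange, List.foldl_append]
    set M := (PySem.List.pyRange 0 (n : Int) 1).foldl _ L with hM
    have hMlen : M.length = W := ihlen
    have hMget : ∀ c < W, M.getD c [] =
        if c < n then
          L.getD c [] ++ (if (PySem.List.pyGetD board i []).getD c 0 ≠ 0
                          then [(PySem.List.pyGetD board i []).getD c 0] else [])
        else L.getD c [] := ihget
    constructor
    · simp only [List.foldl_cons, List.foldl_nil]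
      split
      · simpa [PySem.List.pySetD_natCast] using hMlen
      · exact hMlen
    · intro c hc
      simp only [List.foldl_cons, List.foldl_nil]
      simp only [PySem.List.pyGetD_natCast, PySem.List.pySetD_natCast]
      by_cases hv : (PySem.List.pyGetD board i []).getD n 0 ≠ 0
      · rw [if_pos hv, getD_set M n c _ [] (by omega), hMget c hc]
        by_cases hc' : n = c
        · subst hc'
          rw [if_pos rfl, hMget n (by omega), if_neg (by omega : ¬ n < n),
            if_pos (by omega : n < n + 1), if_pos hv]
        · by_cases h2 : c < n
          · simp [hc', h2, (by omega : c < n + 1)]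
          · simp only [hc', h2, if_neg (by omega : ¬ c < n + 1), if_false]
      · rw [if_neg hv, hMget c hc]
        by_cases hc' : n = c
        · subst hc'
          simp_all [Nat.lt_succ_self]
        · by_cases h2 : c < n
          · simp [h2, (by omega : c < n + 1)]
          · rw [if_neg h2, if_neg (by omega : ¬ c < n + 1)]

-- A's whole build pass, row by row from the bottom
lemma outer_spec (board : List (List Int)) (W : Nat) :
    ∀ (n : Nat), n ≤ board.length → ∀ (L : List (List Int)), L.length = W →
      (((PySem.List.pyRange ((n : Int) - 1) (-1) (-1)).foldl (fun lanes i =>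
        (PySem.List.pyRange 0 (W : Int) 1).foldl (fun lanes j =>
          let v := PySem.List.pyGetD (PySem.List.pyGetD board i []) j 0
          if v ≠ 0 then PySem.List.pySetD lanes j (PySem.List.pyGetD lanes j [] ++ [v]) else lanes)
          lanes)
        L).length = W ∧
      ∀ c < W, ((PySem.List.pyRange ((n : Int) - 1) (-1) (-1)).foldl (fun lanes i =>
        (PySem.List.pyRange 0 (W : Int) 1).foldl (fun lanes j =>
          let v := PySem.List.pyGetD (PySem.List.pyGetD board i []) j 0
          if v ≠ 0 then PySem.List.pySetD lanes j (PySem.List.pyGetD lanes j [] ++ [v]) else lanes)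
          lanes)
        L).getD c [] =
        L.getD c [] ++ ((colOf (board.take n) c).filter (fun x => x ≠ 0)).reverse) := by
  intro n
  induction n with
  | zero =>
    intro _ L hL
    rw [show ((0 : Nat) : Int) - 1 = -1 by norm_num,
      PySem.List.pyRange_neg_one_eq_nil (by norm_num)]
    simp [hL, colOf]
  | succ n ih =>
    intro hn L hL
    have hcons : PySem.List.pyRange (((n + 1 : Nat) : Int) - 1) (-1) (-1) =
        (n : Int) :: PySem.List.pyRange ((n : Int) - 1) (-1) (-1) := by
      push_cast
      rw [show (n : Int) + 1 - 1 = (n : Int) by ring]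
      exact PySem.List.pyRange_neg_one_cons (by omega)
    rw [hcons, List.foldl_cons]
    obtain ⟨ilen, iget⟩ := inner_spec board W (n : Int) W le_rfl L hL
    obtain ⟨olen, oget⟩ := ih (by omega) _ ilen
    refine ⟨olen, fun c hc => ?_⟩
    rw [oget c hc, iget c hc, if_pos hc]
    have hrow : PySem.List.pyGetD board (n : Int) [] = board.getD n [] := by
      simp [List.getD]
    have htake : board.take (n + 1) = board.take n ++ [board.getD n []] := by
      rw [List.take_succ]
      congr 1
      rw [List.getD, List.getElem?_eq_getElem (by omega)]
      rfl
    rw [htake]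
    have hcol : colOf (board.take n ++ [board.getD n []]) c =
        colOf (board.take n) c ++ [(board.getD n []).getD c 0] := by
      simp [colOf]
    rw [hcol, List.filter_append, List.reverse_append, hrow]
    by_cases hv : (board.getD n []).getD c 0 ≠ 0
    · rw [if_pos hv]
      simp only [List.getD] at hv ⊢
      simp [List.filter_cons, hv]
    · rw [if_neg hv]
      push_neg at hv
      simp only [List.getD] at hv ⊢
      simp [List.filter_cons, hv]

lemma build_lanes (board : List (List Int)) (W : Nat) :
    SimInv board W
      ((PySem.List.pyRange ((board.length : Int) - 1) (-1) (-1)).foldl (fun lanes i =>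
        (PySem.List.pyRange 0 (W : Int) 1).foldl (fun lanes j =>
          let v := PySem.List.pyGetD (PySem.List.pyGetD board i []) j 0
          if v ≠ 0 then PySem.List.pySetD lanes j (PySem.List.pyGetD lanes j [] ++ [v]) else lanes)
          lanes)
        (List.replicate W ([] : List Int)))
      (List.replicate W 0) := by
  obtain ⟨olen, oget⟩ := outer_spec board W board.length le_rfl
      (List.replicate W ([] : List Int)) (by simp)
  refine ⟨olen, by simp, fun c hc => ?_⟩
  rw [oget c hc]
  simp [List.take_length]

lemma step_sim (board : List (List Int)) (W : Nat) (m : Int)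
    (hm : 1 - (W : Int) ≤ m ∧ m ≤ (W : Int))
    (hrow : ∀ row ∈ board,
      PySem.List.pyGetD row (m - 1) 0 = row.getD (PySem.Int.mod (m - 1) (W : Int)).toNat 0)
    (lanes : List (List Int)) (top : List Nat) (dolls : List Int) (ans : Int)
    (hInv : SimInv board W lanes top) :
    (stepA (lanes, dolls, ans) m).2 = (stepB board (top, dolls, ans) m).2 ∧
    SimInv board W (stepA (lanes, dolls, ans) m).1 (stepB board (top, dolls, ans) m).1 := by
  obtain ⟨hlanlen, htoplen, hcols⟩ := hInv
  have hWpos : 0 < W := by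
    rcases hm with ⟨h1, h2⟩
    by_contra h
    have : W = 0 := by omega
    subst this
    simp at h1 h2
    omega
  have hWposI : (0 : Int) < (W : Int) := by exact_mod_cast hWpos
  simp only [stepA, stepB]
  set cI := PySem.Int.mod (m - 1) (W : Int) with hcIdef
  have hc0 : 0 ≤ cI := PySem.Int.mod_nonneg _ hWposI
  have hcWI : cI < (W : Int) := PySem.Int.mod_lt _ hWposI
  set c := cI.toNat with hcdef
  have hcW : c < W := by omega
  have hgetA : PySem.List.pyGetD lanes (m - 1) [] = lanes.getD c [] :=
    pyGetD_mod lanes (m - 1) (W : Int) [] (by exact_mod_cast hlanlen) hWposI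
      (by omega) (by omega)
  have hgetB : PySem.List.pyGetD top (m - 1) 0 = top.getD c 0 :=
    pyGetD_mod top (m - 1) (W : Int) 0 (by exact_mod_cast htoplen) hWposI
      (by omega) (by omega)
  rw [hgetB]
  have hlane := hcols c hcW
  set l := colOf board c with hldef
  set t := top.getD c 0 with htdef
  have hskip := skipZeros_spec board (m - 1) c hrow t
  have hlboard : l.length = board.length := by simp [hldef, colOf]
  by_cases hfz : (l.drop t).filter (fun x => x ≠ 0) = []
  · -- empty lane: both sides leave the state unchanged
    have hlaneE : PySem.List.pyGetD lanes (m - 1) [] = [] := by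
      rw [hgetA, hlane, hfz]; rfl
    have hall : ∀ x ∈ l.drop t, x = 0 := by
      intro x hx
      have := List.filter_eq_nil_iff.mp hfz x hx
      simpa using this
    have htw : (l.drop t).takeWhile (fun x => x = 0) = l.drop t := col_allzero _ hall
    have hnr : ¬ skipZeros board (m - 1) t < board.length := by
      rw [hskip, htw, List.length_drop, ← hlboard]; omega
    rw [hlaneE]
    simp only [ne_eq, not_true_eq_false, if_false, if_neg hnr]
    exact ⟨trivial, hlanlen, htoplen, hcols⟩
  · -- nonzero below the pointer: both sides pop the same doll
    obtain ⟨e, rest, hdropk, he, hfilter⟩ := col_decomp (l.drop t) hfz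
    set k := ((l.drop t).takeWhile (fun x => x = 0)).length with hkdef
    have hklt : k < (l.drop t).length := by
      have := congrArg List.length hdropk
      simp [List.length_drop] at this
      simp [List.length_drop]
      omega
    have htl : t < l.length := by
      rw [List.length_drop] at hklt; omega
    set r := skipZeros board (m - 1) t with hrdef
    have hrtk : r = t + k := hskip
    have hrlt : r < board.length := by
      rw [hrtk, ← hlboard]; rw [List.length_drop] at hklt; omega
    have hdropr : l.drop r = e :: rest := by
      rw [hrtk, ← List.drop_drop, hdropk]
    have hcons2 : l.drop r = ((board.getD r []).getD c 0) :: l.drop (r + 1) :=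
      colOf_drop_cons board c r hrlt
    have hdoll : (board.getD r []).getD c 0 = e := by
      rw [hdropr] at hcons2; exact (List.cons.injEq _ _ _ _ ▸ hcons2).1.symm
    have hrest : l.drop (r + 1) = rest := by
      rw [hdropr] at hcons2; exact ((List.cons.injEq _ _ _ _ ▸ hcons2).2).symm
    have hlanev : lanes.getD c [] =
        (rest.filter (fun x => x ≠ 0)).reverse ++ [e] := by
      rw [hlane, hfilter, List.reverse_cons]
    have hlaneNE : PySem.List.pyGetD lanes (m - 1) [] ≠ [] := by
      rw [hgetA, hlanev]; simp
    have hdollA : PySem.List.pyGetD (PySem.List.pyGetD lanes (m - 1) []) (-1) 0 = e := by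
      rw [hgetA, hlanev]; exact PySem.List.pyGetD_neg_one_append_singleton _ _ _
    have hdollB : PySem.List.pyGetD (board.getD r []) (m - 1) 0 = e := by
      rw [hrow _ (getD_mem_of_lt board r hrlt)]; exact hdoll
    have hsetA : PySem.List.pySetD lanes (m - 1)
        (PySem.List.pyGetD lanes (m - 1) []).dropLast =
        lanes.set c ((rest.filter (fun x => x ≠ 0)).reverse) := by
      rw [pySetD_mod lanes (m - 1) (W : Int) _ (by exact_mod_cast hlanlen) hWposI
        (by omega) (by omega), hgetA, hlanev, List.dropLast_concat]
    have hsetB : PySem.List.pySetD top (m - 1) (r + 1) = top.set c (r + 1) :=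
      pySetD_mod top (m - 1) (W : Int) _ (by exact_mod_cast htoplen) hWposI
        (by omega) (by omega)
    have hInv' : SimInv board W (lanes.set c ((rest.filter (fun x => x ≠ 0)).reverse))
        (top.set c (r + 1)) := by
      refine ⟨by simp [hlanlen], by simp [htoplen], fun c' hc' => ?_⟩
      rw [getD_set lanes c c' _ [] (by omega), getD_set top c c' _ 0 (by omega)]
      by_cases hcc : c = c'
      · subst hcc
        rw [if_pos rfl, if_pos rfl, ← hldef, hrest]
      · rw [if_neg hcc, if_neg hcc]
        exact hcols c' hc'
    rw [if_pos hlaneNE, if_pos hrlt, hdollA, hdollB, hsetA, hsetB]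
    by_cases hd : dolls ≠ [] ∧ PySem.List.pyGetD dolls (-1) 0 = e
    · rw [if_pos hd, if_pos hd]
      exact ⟨rfl, hInv'⟩
    · rw [if_neg hd, if_neg hd]
      exact ⟨rfl, hInv'⟩

lemma fold_sim (board : List (List Int)) (W : Nat) (moves : List Int)
    (hm : ∀ m ∈ moves, (1 - (W : Int) ≤ m ∧ m ≤ (W : Int)) ∧
      ∀ row ∈ board,
        PySem.List.pyGetD row (m - 1) 0 = row.getD (PySem.Int.mod (m - 1) (W : Int)).toNat 0) :
    ∀ lanes top dolls ans, SimInv board W lanes top →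
      (moves.foldl stepA (lanes, dolls, ans)).2.2 =
      (moves.foldl (stepB board) (top, dolls, ans)).2.2 := by
  induction moves with
  | nil => intro _ _ _ _ _; rfl
  | cons m ms ih =>
    intro lanes top dolls ans hInv
    obtain ⟨h2, hInv'⟩ := step_sim board W m (hm m (by simp)).1 (hm m (by simp)).2
      lanes top dolls ans hInv
    simp only [List.foldl_cons]
    rw [show stepA (lanes, dolls, ans) m =
        ((stepA (lanes, dolls, ans) m).1, (stepA (lanes, dolls, ans) m).2.1,
         (stepA (lanes, dolls, ans) m).2.2) from rfl,
      show stepB board (top, dolls, ans) m =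
        ((stepB board (top, dolls, ans) m).1, (stepB board (top, dolls, ans) m).2.1,
         (stepB board (top, dolls, ans) m).2.2) from rfl, ← h2]
    exact ih (fun x hx => hm x (by simp [hx])) _ _ _ _ hInv'

-- ===== VERDICT (by name: the statement is the Claim_ definition above) =====
theorem solution_spec : Claim_equal_solution := by
  intro board moves _ hpre
  obtain ⟨hne, hrect, hmv, hrag⟩ := hpre
  unfold Spec_solution solution solution_alt
  set W := board.headI.length with hWdef
  refine fold_sim board W moves (fun m hmem => ⟨hmv m hmem, fun row hrowmem => ?_⟩) _ _ [] 0
    (build_lanes board W)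
  have hWpos : 0 < W := by
    have hmb := hmv m hmem
    omega
  have hWposI : (0 : Int) < (W : Int) := by exact_mod_cast hWpos
  by_cases hp : 1 ≤ m
  · -- positive move: plain non-negative indexing, inside every (≥ W long) row or defaulting alike
    rw [PySem.Int.mod_eq_emod_of_pos hWposI,
      Int.emod_eq_of_lt (by omega) (by have := (hmv m hmem).2; omega)]
    exact pyGetD_nonneg row (m - 1) 0 (by omega)
  · -- non-positive move: Pre_ forces a rectangular board, so the row wraps exactly like the lanes
    have hlen : row.length = W := hrag ⟨m, hmem, by omega⟩ row hrowmem
    exact pyGetD_mod row (m - 1) (W : Int) 0 (by exact_mod_cast hlen) hWposI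
      (by have := (hmv m hmem).1; omega) (by have := (hmv m hmem).2; omega)
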